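-- pv_equiv track=rewrite | github.com/cksdud150/HTG | 토스/2.py | solution
-- ===== SOURCE A (Python) =====
-- from collections import defaultdict, deque
--
-- def solution(relationships, target, limit):
--     dic = defaultdict(list)
--     for a,b in relationships:
--         dic[a].append(b)
--         dic[b].append(a)
--     stage = [-1]*101
--     stage[target] = 0
--
--     deq = deque()
--     deq.append(target)
--
--     while deq:
--         now = deq.popleft()
--         for n in dic[now]:
--             if stage[n] == -1 and stage[now] < limit:
--                 stage[n] = stage[now] + 1
--                 deq.append(n)
--
--     origin = 0
--     new = 0
--     for i in range(1,101):
--         if stage[i] == 1: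
--             origin += 1
--         elif stage[i] > 1:
--             new += 1
--     answer = origin*5+new*10+new
--     return answer
-- ===== SOURCE B (Python) =====
-- from collections import defaultdict
--
-- def solution(relationships, target, limit):
--     adj = defaultdict(list)
--     for a, b in relationships:
--         adj[a].append(b)
--         adj[b].append(a)
--     stage = [-1] * 101
--     stage[target] = 0
--     frontier = [target]
--     for level in range(1, limit + 1):
--         if not frontier:
--             break
--         nxt = []
--         for now in frontier:
--             for n in adj[now]:
--                 if stage[n] == -1:
--                     stage[n] = level
--                     nxt.append(n)
--         frontier = nxt
--     origin = 0
--     new = 0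
--     for i in range(1, 101):
--         if stage[i] == 1:
--             origin += 1
--         elif stage[i] > 1:
--             new += 1
--     return origin * 5 + new * 10 + new
-- ===== Notes on version B (the rewrite author's own statement) =====
-- stated objective: alternative
-- what changed: Replaces A's deque-based BFS with per-neighbor 'stage[now] < limit' checks by a level-synchronous BFS: an explicit loop over levels 1..limit that expands a whole frontier list into the next one, so the depth bound is the loop range and no queue or per-node distance comparison is needed.
-- outside the precondition, e.g. on solution([[200, 300]], 5, 3): A returns 0, B returns 0
import Mathlib
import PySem

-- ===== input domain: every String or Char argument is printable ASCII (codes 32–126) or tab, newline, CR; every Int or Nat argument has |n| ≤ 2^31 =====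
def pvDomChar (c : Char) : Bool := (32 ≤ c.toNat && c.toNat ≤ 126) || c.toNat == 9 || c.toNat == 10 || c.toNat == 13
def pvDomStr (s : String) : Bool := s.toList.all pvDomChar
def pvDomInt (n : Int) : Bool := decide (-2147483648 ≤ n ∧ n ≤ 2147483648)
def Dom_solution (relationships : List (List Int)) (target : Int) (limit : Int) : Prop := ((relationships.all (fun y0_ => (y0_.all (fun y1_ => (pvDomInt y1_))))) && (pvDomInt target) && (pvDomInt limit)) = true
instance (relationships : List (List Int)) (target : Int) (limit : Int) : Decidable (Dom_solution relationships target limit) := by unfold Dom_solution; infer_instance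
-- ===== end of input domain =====

-- B replaces A's deque-based BFS (per-neighbor `stage[now] < limit` checks) by a
-- level-synchronous BFS over frontier lists; same adjacency build and final scan ("alternative").


-- ===== PORT A =====

-- shared helper: the adjacency-dict building loop, IDENTICAL code in both Python sources
-- ('for a,b in relationships: dic[a].append(b); dic[b].append(a)' on a defaultdict(list)).
def buildAdj (relationships : List (List Int)) : PySem.Dict Int (List Int) :=
  relationships.foldl
    (fun d r =>
      match r with
      | [a, b] => (d.modify a [] (fun l => l ++ [b])).modify b [] (fun l => l ++ [a])
      | _ => d)   -- Python raises ValueError on a row not of length 2; Pre_ excludes those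
    PySem.Dict.empty

-- shared helper: the final counting scan, IDENTICAL code in both Python sources
-- ('for i in range(1,101): …; answer = origin*5+new*10+new').
def finalCount (stage : List Int) : Int :=
  let p : Int × Int :=
    (PySem.List.pyRange 1 101 1).foldl
      (fun (p : Int × Int) i =>
        match PySem.List.pyGet? stage i with
        | some v => if v = 1 then (p.1 + 1, p.2) else if v > 1 then (p.1, p.2 + 1) else p
        | none => p)   -- unreachable: stage always has length 101 and 1 ≤ i ≤ 100
      (0, 0)
  p.1 * 5 + p.2 * 10 + p.2

-- A's inner 'for n in dic[now]' loop body, as a fold over the neighbour list.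
def stepA (limit : Int) (now : Int) (ns : List Int) (acc : List Int × List Int) :
    List Int × List Int :=
  ns.foldl
    (fun acc n =>
      match PySem.List.pyGet? acc.1 n, PySem.List.pyGet? acc.1 now with
      | some sn, some snow =>
          if sn = -1 ∧ snow < limit then (PySem.List.pySetD acc.1 n (snow + 1), acc.2 ++ [n])
          else acc
      | _, _ => acc)   -- stage[n] / stage[now] IndexError in Python; Pre_ excludes reaching this
    acc

-- termination bookkeeping for A's while loop (cited by loopA's decreasing_by)
def negCount (st : List Int) : Nat := st.count (-1)

lemma stepA_cons (limit now n : Int) (ns : List Int) (st acc : List Int) :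
    stepA limit now (n :: ns) (st, acc) =
      stepA limit now ns
        (match PySem.List.pyGet? st n, PySem.List.pyGet? st now with
         | some sn, some snow =>
             if sn = -1 ∧ snow < limit then (PySem.List.pySetD st n (snow + 1), acc ++ [n])
             else (st, acc)
         | _, _ => (st, acc)) := rfl

lemma mem_pySetD {st : List Int} {n v x : Int}
    (hx : x ∈ PySem.List.pySetD st n v) : x = v ∨ x ∈ st := by
  unfold PySem.List.pySetD PySem.List.pySet? at hx
  cases hk : PySem.List.pyIdx? st.length n with
  | none => simp [hk] at hx; exact Or.inr hx
  | some k =>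
    simp [hk] at hx
    rcases List.mem_or_eq_of_mem_set hx with h | h
    · exact Or.inr h
    · exact Or.inl h

lemma negCount_pySetD {st : List Int} {n v : Int}
    (hn : PySem.List.pyGet? st n = some (-1)) (hv : v ≠ -1) :
    negCount (PySem.List.pySetD st n v) + 1 = negCount st := by
  unfold PySem.List.pyGet? at hn
  unfold negCount PySem.List.pySetD PySem.List.pySet?
  cases hk : PySem.List.pyIdx? st.length n with
  | none => simp [hk] at hn
  | some k =>
    simp [hk] at hn ⊢
    have hklt : k < st.length := by
      by_contra hge
      simp [List.getElem?_eq_none (by omega : st.length ≤ k)] at hn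
    have hkv : st[k] = -1 := by
      have := List.getElem?_eq_getElem hklt
      rw [this] at hn; exact Option.some.inj hn
    rw [List.count_set hklt]
    have hpos : 0 < st.count (-1) := by
      apply List.count_pos_iff.mpr
      exact hkv ▸ List.getElem_mem hklt
    simp [hkv, hv]
    omega

lemma stepA_inv_measure (limit now : Int) :
    ∀ (ns : List Int) (st : List Int) (acc : List Int), (∀ x ∈ st, -1 ≤ x) →
      (∀ x ∈ (stepA limit now ns (st, acc)).1, -1 ≤ x) ∧
      2 * negCount (stepA limit now ns (st, acc)).1 + (stepA limit now ns (st, acc)).2.length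
        ≤ 2 * negCount st + acc.length := by
  intro ns
  induction ns with
  | nil => intro st acc h; exact ⟨h, by simp [stepA]⟩
  | cons n ns ih =>
    intro st acc h
    rw [stepA_cons]
    cases hgn : PySem.List.pyGet? st n with
    | none =>
      cases hgnow : PySem.List.pyGet? st now with
      | none => exact ih st acc h
      | some snow => exact ih st acc h
    | some sn =>
      cases hgnow : PySem.List.pyGet? st now with
      | none => exact ih st acc h
      | some snow =>
        by_cases hcond : sn = -1 ∧ snow < limit
        · simp only [if_pos hcond]
          have hsnow : -1 ≤ snow := h snow (PySem.List.mem_of_pyGet?_eq_some st hgnow)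
          have hinv1 : ∀ x ∈ PySem.List.pySetD st n (snow + 1), -1 ≤ x := by
            intro x hx
            rcases mem_pySetD hx with hxe | hxm
            · omega
            · exact h x hxm
          obtain ⟨ih1, ih2⟩ := ih (PySem.List.pySetD st n (snow + 1)) (acc ++ [n]) hinv1
          refine ⟨ih1, ?_⟩
          have hcnt : negCount (PySem.List.pySetD st n (snow + 1)) + 1 = negCount st := by
            apply negCount_pySetD (hcond.1 ▸ hgn)
            omega
          simp only [List.length_append, List.length_singleton] at ih2
          omega
        · simp only [if_neg hcond]
          exact ih st acc h

def loopA (dic : PySem.Dict Int (List Int)) (limit : Int)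
    (stage : List Int) (deq : List Int) (h : ∀ x ∈ stage, -1 ≤ x) : List Int :=
  match deq with
  | [] => stage
  | now :: rest =>
    let p := stepA limit now (dic.getD now []) (stage, [])
    loopA dic limit p.1 (rest ++ p.2)
      ((stepA_inv_measure limit now (dic.getD now []) stage [] h).1)
termination_by 2 * negCount stage + deq.length
decreasing_by
  have := (stepA_inv_measure limit now (dic.getD now []) stage [] h).2
  simp only [List.length_nil] at this
  simp only [List.length_append, List.length_cons]
  omega

lemma stage1_inv (target : Int) :
    ∀ x ∈ PySem.List.pySetD (List.replicate 101 (-1 : Int)) target 0, -1 ≤ x := by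
  intro x hx
  rcases mem_pySetD hx with h | h
  · omega
  · have := List.eq_of_mem_replicate h; omega

def solution (relationships : List (List Int)) (target : Int) (limit : Int) : Int :=
  let dic := buildAdj relationships
  -- stage = [-1]*101; stage[target] = 0  (IndexError when target out of range; Pre_ excludes)
  let stage1 := PySem.List.pySetD (List.replicate 101 (-1 : Int)) target 0
  finalCount (loopA dic limit stage1 [target] (stage1_inv target))

-- ===== PORT B =====

-- B's innermost 'for n in adj[now]' loop of one level expansion.
def stepB (level : Int) (ns : List Int) (acc : List Int × List Int) : List Int × List Int :=
  ns.foldl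
    (fun acc n =>
      match PySem.List.pyGet? acc.1 n with
      | some sn => if sn = -1 then (PySem.List.pySetD acc.1 n level, acc.2 ++ [n]) else acc
      | none => acc)   -- stage[n] IndexError in Python; Pre_ excludes reaching this
    acc

-- B's 'for now in frontier' loop of one level.
def expandB (dic : PySem.Dict Int (List Int)) (level : Int) (frontier : List Int)
    (acc : List Int × List Int) : List Int × List Int :=
  frontier.foldl (fun acc now => stepB level (dic.getD now []) acc) acc

-- B's 'for level in range(1, limit+1)' loop: k = number of remaining levels, level = next level.
def loopB (dic : PySem.Dict Int (List Int)) :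
    Nat → Int → List Int → List Int → List Int
  | 0, _, stage, _ => stage
  | k + 1, level, stage, frontier =>
      if frontier = [] then stage
      else
        let p := expandB dic level frontier (stage, [])
        loopB dic k (level + 1) p.1 p.2

def solution_alt (relationships : List (List Int)) (target : Int) (limit : Int) : Int :=
  let dic := buildAdj relationships
  let stage1 := PySem.List.pySetD (List.replicate 101 (-1 : Int)) target 0
  finalCount (loopB dic limit.toNat 1 stage1 [target])

-- ===== PRECONDITION & SPEC =====
-- Pre_ excludes exactly the inputs that can make A raise: rows not of length 2 (ValueError on
-- unpacking) and a target or node id outside -101..100, the valid index range of the fixed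
-- 101-slot stage list (IndexError when such an id is touched).  An out-of-range id that the BFS
-- never reaches does not raise (A returns there) but is still excluded, since reachability is
-- not a closed-form condition; see the cite in claim.json (both programs agree there anyway).
def Pre_solution (relationships : List (List Int)) (target : Int) (limit : Int) : Prop :=
  (-101 ≤ target ∧ target ≤ 100) ∧
  ∀ r ∈ relationships, r.length = 2 ∧ ∀ x ∈ r, -101 ≤ x ∧ x ≤ 100

instance (relationships : List (List Int)) (target : Int) (limit : Int) :
    Decidable (Pre_solution relationships target limit) := by unfold Pre_solution; infer_instance

def pvWitness_solution : List (List Int) × Int × Int := ([[1, 2], [2, 3], [3, 4]], 1, 2)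

def Spec_solution (relationships : List (List Int)) (target : Int) (limit : Int) (out : Int) :
    Prop := out = solution_alt relationships target limit
instance (relationships : List (List Int)) (target : Int) (limit : Int) (out : Int) :
    Decidable (Spec_solution relationships target limit out) := by unfold Spec_solution; infer_instance

-- ===== CLAIM (what is proved, stated in full; the proofs are below) =====
def Claim_equal_solution : Prop :=
  ∀ (relationships : List (List Int)) (target : Int) (limit : Int),
    Dom_solution relationships target limit → Pre_solution relationships target limit →
    Spec_solution relationships target limit (solution relationships target limit)

-- ===== LEMMAS AND PROOFS =====

lemma pyGet?_pySetD_self {st : List Int} {n w v : Int}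
    (h : PySem.List.pyGet? st n = some w) :
    PySem.List.pyGet? (PySem.List.pySetD st n v) n = some v := by
  unfold PySem.List.pyGet? PySem.List.pySetD PySem.List.pySet? at *
  cases hk : PySem.List.pyIdx? st.length n with
  | none => simp [hk] at h
  | some k =>
    simp only [hk, Option.map_some, Option.getD_some] at h ⊢
    have hklt : k < st.length := by
      by_contra hge
      simp [List.getElem?_eq_none (by omega : st.length ≤ k)] at h
    simp [List.length_set, hk, hklt]

lemma pyGet?_pySetD_other {st : List Int} {n m v : Int}
    (hn : PySem.List.pyGet? st n = some (-1)) (hm : PySem.List.pyGet? st m ≠ some (-1)) :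
    PySem.List.pyGet? (PySem.List.pySetD st n v) m = PySem.List.pyGet? st m := by
  unfold PySem.List.pyGet? PySem.List.pySetD PySem.List.pySet? at *
  cases hk : PySem.List.pyIdx? st.length n with
  | none => simp
  | some k =>
    simp only [hk, Option.map_some, Option.getD_some] at hn ⊢
    have hklt : k < st.length := by
      by_contra hge
      simp [List.getElem?_eq_none (by omega : st.length ≤ k)] at hn
    have hkv : st[k]? = some (-1) := by simpa using hn
    rw [List.length_set]
    cases hj : PySem.List.pyIdx? st.length m with
    | none => simp
    | some j =>
      simp only [Option.bind_some]
      by_cases hjk : j = k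
      · subst hjk
        exfalso
        apply hm
        simp [hj, hkv]
      · rw [List.getElem?_set_ne (by omega : k ≠ j)]

lemma stepB_cons (level n : Int) (ns : List Int) (st acc : List Int) :
    stepB level (n :: ns) (st, acc) =
      stepB level ns
        (match PySem.List.pyGet? st n with
         | some sn => if sn = -1 then (PySem.List.pySetD st n level, acc ++ [n]) else (st, acc)
         | none => (st, acc)) := rfl

-- one neighbour scan: A's fold (with its stage[now] < limit test) equals B's fold at level s+1
lemma step_eq (limit now s : Int) (hs : 0 ≤ s) (hlim : s < limit) :
    ∀ (ns st : List Int), (∀ x ∈ st, -1 ≤ x) → PySem.List.pyGet? st now = some s →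
      ∃ st' nw,
        (∀ acc : List Int, stepA limit now ns (st, acc) = (st', acc ++ nw)) ∧
        (∀ acc : List Int, stepB (s + 1) ns (st, acc) = (st', acc ++ nw)) ∧
        (∀ x ∈ st', -1 ≤ x) ∧
        (∀ m, PySem.List.pyGet? st m ≠ some (-1) →
          PySem.List.pyGet? st' m = PySem.List.pyGet? st m) ∧
        (∀ n' ∈ nw, PySem.List.pyGet? st' n' = some (s + 1)) := by
  intro ns
  induction ns with
  | nil =>
    intro st h hnow
    exact ⟨st, [], fun acc => by simp [stepA], fun acc => by simp [stepB],
      h, fun m _ => rfl, by simp⟩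
  | cons n ns ih =>
    intro st h hnow
    cases hgn : PySem.List.pyGet? st n with
    | none =>
      obtain ⟨st', nw, hA, hB, h', pres, slots⟩ := ih st h hnow
      exact ⟨st', nw,
        fun acc => by rw [stepA_cons, hgn, hnow]; exact hA acc,
        fun acc => by rw [stepB_cons, hgn]; exact hB acc,
        h', pres, slots⟩
    | some sn =>
      by_cases hsn : sn = -1
      · subst hsn
        set st1 := PySem.List.pySetD st n (s + 1) with hst1
        have h1 : ∀ x ∈ st1, -1 ≤ x := by
          intro x hx
          rcases mem_pySetD hx with hxe | hxm
          · omega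
          · exact h x hxm
        have pres1 : ∀ m, PySem.List.pyGet? st m ≠ some (-1) →
            PySem.List.pyGet? st1 m = PySem.List.pyGet? st m := by
          intro m hm
          exact pyGet?_pySetD_other hgn hm
        have hnow1 : PySem.List.pyGet? st1 now = some s := by
          rw [pres1 now (by rw [hnow]; intro hc; injection hc with hc; omega)]
          exact hnow
        obtain ⟨st', nw, hA, hB, h', pres, slots⟩ := ih st1 h1 hnow1
        refine ⟨st', n :: nw, ?_, ?_, h', ?_, ?_⟩
        · intro acc
          rw [stepA_cons, hgn, hnow]
          simp only [true_and, if_pos hlim]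
          rw [hA (acc ++ [n])]
          simp
        · intro acc
          rw [stepB_cons, hgn]
          simp only [if_pos]
          rw [hB (acc ++ [n])]
          simp
        · intro m hm
          rw [pres m (by rw [pres1 m hm]; exact hm), pres1 m hm]
        · intro n' hn'
          rcases List.mem_cons.mp hn' with hne | hnm
          · subst hne
            have : PySem.List.pyGet? st1 n' = some (s + 1) := pyGet?_pySetD_self hgn
            rw [pres n' (by rw [this]; intro hc; injection hc with hc; omega)]
            exact this
          · exact slots n' hnm
      · obtain ⟨st', nw, hA, hB, h', pres, slots⟩ := ih st h hnow
        exact ⟨st', nw,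
          fun acc => by
            rw [stepA_cons, hgn, hnow]
            simp only [if_neg (by tauto : ¬ (sn = -1 ∧ s < limit))]
            exact hA acc,
          fun acc => by
            rw [stepB_cons, hgn]
            simp only [if_neg hsn]
            exact hB acc,
          h', pres, slots⟩

lemma step_noop (limit now s : Int) (hlim : ¬ s < limit) :
    ∀ (ns st : List Int) (acc : List Int), PySem.List.pyGet? st now = some s →
      stepA limit now ns (st, acc) = (st, acc) := by
  intro ns
  induction ns with
  | nil => intro st acc _; simp [stepA]
  | cons n ns ih =>
    intro st acc hnow
    rw [stepA_cons, hnow]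
    cases hgn : PySem.List.pyGet? st n with
    | none => exact ih st acc hnow
    | some sn =>
      simp only [if_neg (by tauto : ¬ (sn = -1 ∧ s < limit))]
      exact ih st acc hnow

lemma loopA_nil (dic : PySem.Dict Int (List Int)) (limit : Int) (stage : List Int)
    (h : ∀ x ∈ stage, -1 ≤ x) : loopA dic limit stage [] h = stage := by
  rw [loopA]

lemma loopA_cons (dic : PySem.Dict Int (List Int)) (limit : Int) (stage : List Int)
    (now : Int) (rest : List Int) (h : ∀ x ∈ stage, -1 ≤ x) :
    loopA dic limit stage (now :: rest) h =
      loopA dic limit (stepA limit now (dic.getD now []) (stage, [])).1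
        (rest ++ (stepA limit now (dic.getD now []) (stage, [])).2)
        ((stepA_inv_measure limit now (dic.getD now []) stage [] h).1) := by
  conv_lhs => rw [loopA]

-- once every frontier node sits at level s ≥ limit, A's remaining loop marks nothing
lemma loopA_noop (dic : PySem.Dict Int (List Int)) (limit s : Int) (hlim : ¬ s < limit) :
    ∀ (F stage : List Int) (h : ∀ x ∈ stage, -1 ≤ x),
      (∀ now ∈ F, PySem.List.pyGet? stage now = some s) →
      loopA dic limit stage F h = stage := by
  intro F
  induction F with
  | nil => intro stage h _; exact loopA_nil dic limit stage h
  | cons now F ih =>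
    intro stage h hF
    rw [loopA_cons]
    have hnoop := step_noop limit now s hlim (dic.getD now []) stage [] (hF now (by simp))
    simp only [hnoop, List.append_nil]
    exact ih stage h (fun n hn => hF n (by simp [hn]))

-- A working through one whole level F equals B's expandB on F
lemma levelStep (dic : PySem.Dict Int (List Int)) (limit s : Int)
    (hs : 0 ≤ s) (hlim : s < limit) :
    ∀ (F stage G : List Int) (h : ∀ x ∈ stage, -1 ≤ x),
      (∀ now ∈ F, PySem.List.pyGet? stage now = some s) →
      ∃ st' nw, ∃ h' : ∀ x ∈ st', -1 ≤ x,
        loopA dic limit stage (F ++ G) h = loopA dic limit st' (G ++ nw) h' ∧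
        expandB dic (s + 1) F (stage, G) = (st', G ++ nw) ∧
        (∀ m, PySem.List.pyGet? stage m ≠ some (-1) →
          PySem.List.pyGet? st' m = PySem.List.pyGet? stage m) ∧
        (∀ n' ∈ nw, PySem.List.pyGet? st' n' = some (s + 1)) := by
  intro F
  induction F with
  | nil =>
    intro stage G h _
    exact ⟨stage, [], h, by simp, by simp [expandB], fun m _ => rfl, by simp⟩
  | cons now F ih =>
    intro stage G h hF
    obtain ⟨st1, nw1, hA, hB, h1, pres1, slots1⟩ :=
      step_eq limit now s hs hlim (dic.getD now []) stage h (hF now (by simp))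
    have hF1 : ∀ now' ∈ F, PySem.List.pyGet? st1 now' = some s := by
      intro now' hm
      rw [pres1 now' (by rw [hF now' (by simp [hm])]; intro hc; injection hc with hc; omega)]
      exact hF now' (by simp [hm])
    obtain ⟨st', nw', h', e1, e2, pres, slots⟩ := ih st1 (G ++ nw1) h1 hF1
    refine ⟨st', nw1 ++ nw', h', ?_, ?_, ?_, ?_⟩
    · rw [List.cons_append, loopA_cons]
      simp only [hA []]
      calc loopA dic limit st1 (F ++ G ++ ([] ++ nw1)) _
          = loopA dic limit st1 (F ++ (G ++ nw1)) h1 := by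
            simp only [List.nil_append, List.append_assoc]
        _ = loopA dic limit st' ((G ++ nw1) ++ nw') h' := e1
        _ = loopA dic limit st' (G ++ (nw1 ++ nw')) h' := by rw [List.append_assoc]
    · have : expandB dic (s + 1) (now :: F) (stage, G) =
          expandB dic (s + 1) F (stepB (s + 1) (dic.getD now []) (stage, G)) := rfl
      rw [this, hB G, e2, List.append_assoc]
    · intro m hm
      rw [pres m (by rw [pres1 m hm]; exact hm), pres1 m hm]
    · intro n' hn'
      rcases List.mem_append.mp hn' with hm1 | hm2
      · have := slots1 n' hm1
        rw [pres n' (by rw [this]; intro hc; injection hc with hc; omega)]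
        exact this
      · exact slots n' hm2

lemma bridge (dic : PySem.Dict Int (List Int)) (limit : Int) :
    ∀ (k : Nat) (s : Int) (stage F : List Int) (h : ∀ x ∈ stage, -1 ≤ x),
      0 ≤ s → (∀ now ∈ F, PySem.List.pyGet? stage now = some s) →
      (k : Int) + s = max limit s →
      loopA dic limit stage F h = loopB dic k (s + 1) stage F := by
  intro k
  induction k with
  | zero =>
    intro s stage F h hs hF hk
    have hls : limit ≤ s := by
      by_cases hle : limit ≤ s
      · exact hle
      · rw [max_eq_left (by omega)] at hk; push_cast at hk; omega
    rw [loopB]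
    exact loopA_noop dic limit s (by omega) F stage h hF
  | succ k ih =>
    intro s stage F h hs hF hk
    have hsl : s < limit := by
      by_cases hle : limit ≤ s
      · rw [max_eq_right hle] at hk; push_cast at hk; omega
      · omega
    rw [max_eq_left (le_of_lt hsl)] at hk
    by_cases hFnil : F = []
    · subst hFnil
      rw [loopA_nil, loopB]
      simp
    · obtain ⟨st', nw, h', e1, e2, _, slots⟩ :=
        levelStep dic limit s hs hsl F stage [] h hF
      rw [List.append_nil] at e1
      rw [List.nil_append] at e1 e2
      rw [loopB]
      simp only [if_neg hFnil, e2]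
      rw [e1]
      exact ih (s + 1) st' nw h' (by omega) slots
        (by rw [max_eq_left (by omega)]; push_cast at hk ⊢; omega)

-- ===== VERDICT (by name: the statement is the Claim_ definition above) =====
theorem solution_spec : Claim_equal_solution := by
  unfold Claim_equal_solution
  intro rel t l _ hpre
  unfold Spec_solution solution solution_alt
  obtain ⟨⟨ht1, ht2⟩, _⟩ := hpre
  have hInR : PySem.Raise.InRange (List.replicate 101 (-1 : Int)).length t := by
    constructor <;> simp <;> omega
  have h0 : PySem.List.pyGet? (List.replicate 101 (-1 : Int)) t = some (-1) := by
    cases hg : PySem.List.pyGet? (List.replicate 101 (-1 : Int)) t with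
    | none =>
      exfalso
      exact ((PySem.List.pyGet?_eq_none_iff _ _).mp hg) hInR
    | some w =>
      have := PySem.List.mem_of_pyGet?_eq_some _ hg
      have := List.eq_of_mem_replicate this
      rw [this]
  have hst1 : PySem.List.pyGet? (PySem.List.pySetD (List.replicate 101 (-1 : Int)) t 0) t
      = some 0 := pyGet?_pySetD_self h0
  have hb := bridge (buildAdj rel) l l.toNat 0
    (PySem.List.pySetD (List.replicate 101 (-1 : Int)) t 0) [t]
    (stage1_inv t) le_rfl
    (by intro now hn; rw [List.mem_singleton] at hn; rw [hn]; exact hst1)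
    (by omega)
  norm_num at hb
  show finalCount (loopA (buildAdj rel) l
      (PySem.List.pySetD (List.replicate 101 (-1 : Int)) t 0) [t] (stage1_inv t)) =
    finalCount (loopB (buildAdj rel) l.toNat 1
      (PySem.List.pySetD (List.replicate 101 (-1 : Int)) t 0) [t])
  rw [hb]
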